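-- pv_equiv track=rewrite | github.com/ronado2468-max/- | day29.py | collect_status
-- ===== SOURCE A (Python) =====
-- def sei_kazu(numbers):
--     result = [n for n in numbers if n > 0]
--
--     if not result:
--         return "NONE"
--
--     m = max(result)
--     if m >= 100:
--         status = "EXCELLENT"
--     elif m >= 50:
--         status = "GOOD"
--     else:
--         status = "OK"
--
--     return {
--         "max": m,
--         "status": status
--     }
--
-- def collect_status(data_list):
--     results = []
--
--     for numbers in data_list:
--         result = sei_kazu(numbers)
--
--         if result == "NONE":
--             results.append("NONE")
--         else:
--             results.append(result["status"])
--
--     return results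
-- ===== SOURCE B (Python) =====
-- def collect_status(data_list):
--     def classify(numbers):
--         if any(n >= 100 for n in numbers):
--             return "EXCELLENT"
--         if any(n >= 50 for n in numbers):
--             return "GOOD"
--         if any(n > 0 for n in numbers):
--             return "OK"
--         return "NONE"
--     return [classify(numbers) for numbers in data_list]
-- ===== Notes on version B (the rewrite author's own statement) =====
-- stated objective: simpler
-- what changed: Replaced the helper's filter-positives-then-max-then-branch pipeline with direct short-circuit threshold membership tests (any n>=100 / >=50 / >0) per sublist; no filtered list or maximum is maintained.
import Mathlib
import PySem

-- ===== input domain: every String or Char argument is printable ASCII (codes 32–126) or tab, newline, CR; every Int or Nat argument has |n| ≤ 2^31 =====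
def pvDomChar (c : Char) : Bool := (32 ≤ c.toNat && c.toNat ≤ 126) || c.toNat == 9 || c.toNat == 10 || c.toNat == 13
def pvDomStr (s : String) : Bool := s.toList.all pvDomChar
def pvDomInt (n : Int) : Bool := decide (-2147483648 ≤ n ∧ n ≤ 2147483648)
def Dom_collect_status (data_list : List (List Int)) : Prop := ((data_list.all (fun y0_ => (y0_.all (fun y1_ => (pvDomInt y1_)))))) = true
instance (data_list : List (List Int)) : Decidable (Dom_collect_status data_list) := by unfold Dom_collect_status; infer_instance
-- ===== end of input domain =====

-- B classifies each sublist with direct short-circuit threshold scans (any ≥100 / ≥50 / >0) instead of filtering positives and taking a max; objective: simpler.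


-- ===== PORT A =====
-- sei_kazu returns "NONE" or a dict {"max": m, "status": s}; modelled as Option (Int × String):
-- none = "NONE", some (m, s) = the dict.
def sei_kazu (numbers : List Int) : Option (Int × String) :=
  let result := numbers.filter (fun n => decide (n > 0))
  if result = [] then none
  else
    match PySem.List.max? result (fun x => x) with
    | none => none  -- unreachable: result ≠ []
    | some m =>
      let status := if m ≥ 100 then "EXCELLENT" else if m ≥ 50 then "GOOD" else "OK"
      some (m, status)

def collect_status (data_list : List (List Int)) : List String :=
  data_list.foldl (fun results numbers =>
    match sei_kazu numbers with
    | none => results ++ ["NONE"]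
    | some (_, s) => results ++ [s]) []

-- ===== PORT B =====
def pvClassify (numbers : List Int) : String :=
  if numbers.any (fun n => decide (n ≥ 100)) then "EXCELLENT"
  else if numbers.any (fun n => decide (n ≥ 50)) then "GOOD"
  else if numbers.any (fun n => decide (n > 0)) then "OK"
  else "NONE"

def collect_status_alt (data_list : List (List Int)) : List String :=
  data_list.map pvClassify

-- ===== PRECONDITION & SPEC =====
def Spec_collect_status (data_list : List (List Int)) (out : List String) : Prop := out = collect_status_alt data_list
instance (data_list : List (List Int)) (out : List String) : Decidable (Spec_collect_status data_list out) := by unfold Spec_collect_status; infer_instance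

-- ===== CLAIM (what is proved, stated in full; the proofs are below) =====
def Claim_equal_collect_status : Prop := ∀ (data_list : List (List Int)), Dom_collect_status data_list → Spec_collect_status data_list (collect_status data_list)

-- ===== LEMMAS AND PROOFS =====

theorem pv_one (numbers : List Int) :
    (match sei_kazu numbers with
     | none => "NONE"
     | some (_, s) => s) = pvClassify numbers := by
  unfold sei_kazu pvClassify
  by_cases hE : numbers.filter (fun n => decide (n > 0)) = []
  · have hno : ∀ n ∈ numbers, ¬ (n > 0) := by
      intro n hn hpos
      have : n ∈ numbers.filter (fun n => decide (n > 0)) := by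
        simp [List.mem_filter, hn, hpos]
      simp [hE] at this
    have h1 : numbers.any (fun n => decide (n ≥ 100)) = false := by
      simp only [List.any_eq_false]; intro n hn; simp; have := hno n hn; omega
    have h2 : numbers.any (fun n => decide (n ≥ 50)) = false := by
      simp only [List.any_eq_false]; intro n hn; simp; have := hno n hn; omega
    have h3 : numbers.any (fun n => decide (n > 0)) = false := by
      simp only [List.any_eq_false]; intro n hn; simp; have := hno n hn; omega
    simp [hE, h1, h2, h3]
  · cases hm : PySem.List.max? (numbers.filter (fun n => decide (n > 0))) (fun x => x) with
    | none => exact absurd (((PySem.List.max?_eq_none_iff _ _).mp hm)) hE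
    | some m =>
      have hmem := PySem.List.max?_mem hm
      have hmax := PySem.List.max?_isMax hm
      have hmN : m ∈ numbers ∧ m > 0 := by
        have := List.mem_filter.mp hmem; simpa using this
      have hub : ∀ y ∈ numbers, y > 0 → y ≤ m := by
        intro y hy hp
        exact hmax y (List.mem_filter.mpr ⟨hy, by simpa using hp⟩)
      by_cases h100 : m ≥ 100
      · have : numbers.any (fun n => decide (n ≥ 100)) = true := by
          simp only [List.any_eq_true]; exact ⟨m, hmN.1, by simpa using h100⟩
        simp [hE, hm, h100, this]
      · have a100 : numbers.any (fun n => decide (n ≥ 100)) = false := by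
          simp only [List.any_eq_false]; intro n hn; simp
          by_contra hc; rw [not_lt] at hc
          have := hub n hn (by omega); omega
        by_cases h50 : m ≥ 50
        · have : numbers.any (fun n => decide (n ≥ 50)) = true := by
            simp only [List.any_eq_true]; exact ⟨m, hmN.1, by simpa using h50⟩
          simp [hE, hm, h100, h50, a100, this]
        · have a50 : numbers.any (fun n => decide (n ≥ 50)) = false := by
            simp only [List.any_eq_false]; intro n hn; simp
            by_contra hc; rw [not_lt] at hc
            have := hub n hn (by omega); omega
          have aOK : numbers.any (fun n => decide (n > 0)) = true := by
            simp only [List.any_eq_true]; exact ⟨m, hmN.1, by simpa using hmN.2⟩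
          simp [hE, hm, h100, h50, a100, a50, aOK]

theorem pv_foldl (l : List (List Int)) (acc : List String) :
    l.foldl (fun results numbers =>
      match sei_kazu numbers with
      | none => results ++ ["NONE"]
      | some (_, s) => results ++ [s]) acc = acc ++ l.map pvClassify := by
  induction l generalizing acc with
  | nil => simp
  | cons h t ih =>
    have h1 : (match sei_kazu h with
               | none => acc ++ ["NONE"]
               | some (_, s) => acc ++ [s]) = acc ++ [pvClassify h] := by
      rw [← pv_one h]; cases sei_kazu h <;> simp
    simp only [List.foldl_cons, List.map_cons]
    rw [h1, ih]
    simp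

-- ===== VERDICT (by name: the statement is the Claim_ definition above) =====
theorem collect_status_spec : Claim_equal_collect_status := by
  intro data_list _
  unfold Spec_collect_status collect_status collect_status_alt
  simpa using pv_foldl data_list []
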